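-- pv_equiv track=rewrite | github.com/mcqueary/gravedigger | src/graver/api.py | get_prefix_suffix
-- ===== SOURCE A (Python) =====
-- def get_prefix_suffix(name: str, memorial_link: str):
--     # simple name is derived from the final path component in a memorial link
--     # e.g. /memorial/12345/john-q-smith (simple name is "john q smith")
--     prefix = None
--     suffix = None
--
--     elements = memorial_link.split("/")
--     simple_name = elements[len(elements) - 1]
--     simple_name_tokens = simple_name.split("-")
--     full_name_tokens = name.split(" ")
--
--     for idx in range(0, len(full_name_tokens)):
--         if full_name_tokens[idx].lower().replace(".", "") != simple_name_tokens[0]: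
--             if prefix is None:
--                 prefix = full_name_tokens[idx]
--             else:
--                 prefix += f" {full_name_tokens[idx]}"
--         else:
--             break
--
--     tok = full_name_tokens[len(full_name_tokens) - 1].replace(".", "")
--     if tok.lower() != simple_name_tokens[len(simple_name_tokens) - 1]:
--         suffix = full_name_tokens[len(full_name_tokens) - 1]
--     return prefix, suffix
-- ===== SOURCE B (Python) =====
-- def get_prefix_suffix(name: str, memorial_link: str):
--     # index-then-slice: find the first token matching the simple name's head,
--     # join everything before it (None when nothing precedes it)
--     simple = memorial_link.split("/")[-1].split("-")
--     toks = name.split(" ")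
--     k = next((i for i, t in enumerate(toks)
--               if t.lower().replace(".", "") == simple[0]), len(toks))
--     prefix = " ".join(toks[:k]) if k else None
--     suffix = toks[-1] if toks[-1].replace(".", "").lower() != simple[-1] else None
--     return prefix, suffix
-- ===== Notes on version B (the rewrite author's own statement) =====
-- stated objective: simpler
-- what changed: Replaces A's accumulate-or-break loop (optional string accumulator grown with ' ' joins) by computing the first matching token index, slicing the tokens before it and joining them once, with None exactly when the index is 0.
import Mathlib
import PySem

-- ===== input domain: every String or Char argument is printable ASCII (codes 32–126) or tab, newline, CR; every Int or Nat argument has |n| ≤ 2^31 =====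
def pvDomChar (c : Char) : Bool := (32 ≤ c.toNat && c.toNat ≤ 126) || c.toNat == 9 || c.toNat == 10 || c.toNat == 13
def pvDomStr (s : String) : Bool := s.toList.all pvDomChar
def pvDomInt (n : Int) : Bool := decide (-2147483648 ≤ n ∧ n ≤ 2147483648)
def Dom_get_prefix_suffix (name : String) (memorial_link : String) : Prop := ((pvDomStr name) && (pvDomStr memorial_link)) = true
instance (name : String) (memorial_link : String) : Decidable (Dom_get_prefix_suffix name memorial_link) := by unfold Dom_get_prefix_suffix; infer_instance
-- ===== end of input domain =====

-- B replaces A's accumulate-or-break loop by find-index, slice and join (objective: simpler decomposition, same cost).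

-- ===== PORT A =====
-- s.split(sep) for a non-empty literal separator (split? is none only for sep = "")
def pvSplit (s sep : String) : List String := (PySem.Str.split? s sep).getD []

-- A's for-loop with break: walks the tokens, appending to the optional prefix
-- accumulator until the first token whose lowered, dot-stripped form equals the target.
def pvLoopA (target : String) : List String → Option String → Option String
  | [], pfx => pfx
  | t :: rest, pfx =>
    if PySem.Str.replace (PySem.Str.lower t) "." "" ≠ target then
      pvLoopA target rest (some (match pfx with
        | none => t
        | some p => p ++ " " ++ t))
    else pfx

def get_prefix_suffix (name : String) (memorial_link : String) : Option String × Option String :=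
  let elements := pvSplit memorial_link "/"
  let simple_name := elements.getLastD ""                  -- elements[len(elements)-1]; split never returns []
  let simple_name_tokens := pvSplit simple_name "-"
  let full_name_tokens := pvSplit name " "
  let pfx := pvLoopA (simple_name_tokens.headD "") full_name_tokens none
  let tok := PySem.Str.replace (full_name_tokens.getLastD "") "." ""
  let suffix :=
    if PySem.Str.lower tok ≠ simple_name_tokens.getLastD "" then
      some (full_name_tokens.getLastD "")
    else none
  (pfx, suffix)

-- ===== PORT B =====
def get_prefix_suffix_alt (name : String) (memorial_link : String) : Option String × Option String :=
  let simple : List String := pvSplit ((pvSplit memorial_link "/").getLastD "") "-"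
  let toks : List String := pvSplit name " "
  let k := toks.findIdx (fun t => PySem.Str.replace (PySem.Str.lower t) "." "" == simple.headD "")
  let pfx := if k = 0 then none else some (PySem.Str.join " " (toks.take k))
  let suffix :=
    if PySem.Str.lower (PySem.Str.replace (toks.getLastD "") "." "") ≠ simple.getLastD "" then
      some (toks.getLastD "")
    else none
  (pfx, suffix)

-- ===== PRECONDITION & SPEC =====
def Spec_get_prefix_suffix (name : String) (memorial_link : String) (out : Option String × Option String) : Prop := out = get_prefix_suffix_alt name memorial_link
instance (name : String) (memorial_link : String) (out : Option String × Option String) : Decidable (Spec_get_prefix_suffix name memorial_link out) := by unfold Spec_get_prefix_suffix; infer_instance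

-- ===== CLAIM (what is proved, stated in full; the proofs are below) =====
def Claim_equal_get_prefix_suffix : Prop := ∀ (name : String) (memorial_link : String), Dom_get_prefix_suffix name memorial_link → Spec_get_prefix_suffix name memorial_link (get_prefix_suffix name memorial_link)

-- ===== LEMMAS AND PROOFS =====

theorem str_join_singleton (s : String) : PySem.Str.join " " [s] = s := by
  rw [← String.toList_inj]
  simp [PySem.Str.toList_join, PySem.Chars.join_singleton]

theorem str_join_glue (a b : String) (l : List String) :
    PySem.Str.join " " ((a ++ " " ++ b) :: l) = PySem.Str.join " " (a :: b :: l) := by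
  rw [← String.toList_inj]
  cases l with
  | nil =>
    simp [PySem.Str.toList_join, PySem.Chars.join_singleton, PySem.Chars.join_cons_cons]
  | cons c l' =>
    simp [PySem.Str.toList_join, PySem.Chars.join_cons_cons, List.append_assoc]

-- invariant of A's loop when the accumulator already holds some prefix
theorem pvLoopA_some (target : String) (rest : List String) (p0 : String) :
    pvLoopA target rest (some p0) =
      some (PySem.Str.join " "
        (p0 :: rest.take (rest.findIdx (fun t => PySem.Str.replace (PySem.Str.lower t) "." "" == target)))) := by
  induction rest generalizing p0 with
  | nil => simp [pvLoopA, str_join_singleton]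
  | cons t rest ih =>
    by_cases h : PySem.Str.replace (PySem.Str.lower t) "." "" = target
    · simp [pvLoopA, h, List.findIdx_cons, str_join_singleton]
    · have hb : (PySem.Str.replace (PySem.Str.lower t) "." "" == target) = false := by
        simpa using h
      simp only [pvLoopA, if_pos h, List.findIdx_cons, hb, cond_false, ih, str_join_glue,
        List.take_succ_cons]

theorem pvLoopA_eq (target : String) (toks : List String) :
    pvLoopA target toks none =
      (if toks.findIdx (fun t => PySem.Str.replace (PySem.Str.lower t) "." "" == target) = 0 then none
       else some (PySem.Str.join " "
         (toks.take (toks.findIdx (fun t => PySem.Str.replace (PySem.Str.lower t) "." "" == target))))) := by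
  cases toks with
  | nil => simp [pvLoopA]
  | cons t rest =>
    by_cases h : PySem.Str.replace (PySem.Str.lower t) "." "" = target
    · simp [pvLoopA, h, List.findIdx_cons]
    · have hb : (PySem.Str.replace (PySem.Str.lower t) "." "" == target) = false := by
        simpa using h
      simp only [pvLoopA, if_pos h, List.findIdx_cons, hb, cond_false, pvLoopA_some]
      simp [List.take_succ_cons]

-- ===== VERDICT (by name: the statement is the Claim_ definition above) =====
theorem get_prefix_suffix_spec : Claim_equal_get_prefix_suffix := by
  intro name memorial_link _
  unfold Spec_get_prefix_suffix get_prefix_suffix get_prefix_suffix_alt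
  simp only [pvLoopA_eq]
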